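-- pv_equiv track=rewrite | github.com/jcolinpatrick/kryptos | scripts/transposition/columnar/e_grid31_shifting_matrix_04.py | shifted_matrix_encrypt
-- ===== SOURCE A (Python) =====
-- def shifted_matrix_encrypt(text, width, shifts, col_order=None):
--     """Write text in rows of width W, shift each row left by shifts[row],
--     then read columns in col_order."""
--     nrows = (len(text) + width - 1) // width
--     grid = {}
--     for i, ch in enumerate(text):
--         r, c = divmod(i, width)
--         # Shift row r left by shifts[r]
--         new_c = (c - shifts[r]) % width
--         grid[(r, new_c)] = ch
--
--     if col_order is None:
--         col_order = list(range(width))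
--
--     result = []
--     for col in col_order:
--         for row in range(nrows):
--             if (row, col) in grid:
--                 result.append(grid[(row, col)])
--     return ''.join(result)
-- ===== SOURCE B (Python) =====
-- def shifted_matrix_encrypt(text, width, shifts, col_order=None):
--     """Gather directly: for each requested column, compute for every row the
--     source index i = row*width + (col + shifts[row]) % width and take text[i]
--     when it exists. No grid dict, no scatter pass."""
--     n = len(text)
--     nrows = (n + width - 1) // width
--     if col_order is None:
--         col_order = range(width)
--     out = []
--     for col in col_order:
--         if 0 <= col < width:
--             for row in range(nrows):
--                 i = row * width + (col + shifts[row]) % width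
--                 if i < n:
--                     out.append(text[i])
--     return ''.join(out)
-- ===== Notes on version B (the rewrite author's own statement) =====
-- stated objective: faster
-- what changed: B drops A's scatter pass that builds a dict grid keyed by (row, shifted column) and instead gathers directly: for each requested in-range column and each row it computes the source index i = row*width + (col + shifts[row]) % width and picks text[i] when i < len(text).
-- outside the precondition, e.g. on shifted_matrix_encrypt('a', -2, [0], [0]): A returns 'a', B returns ''
import Mathlib
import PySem

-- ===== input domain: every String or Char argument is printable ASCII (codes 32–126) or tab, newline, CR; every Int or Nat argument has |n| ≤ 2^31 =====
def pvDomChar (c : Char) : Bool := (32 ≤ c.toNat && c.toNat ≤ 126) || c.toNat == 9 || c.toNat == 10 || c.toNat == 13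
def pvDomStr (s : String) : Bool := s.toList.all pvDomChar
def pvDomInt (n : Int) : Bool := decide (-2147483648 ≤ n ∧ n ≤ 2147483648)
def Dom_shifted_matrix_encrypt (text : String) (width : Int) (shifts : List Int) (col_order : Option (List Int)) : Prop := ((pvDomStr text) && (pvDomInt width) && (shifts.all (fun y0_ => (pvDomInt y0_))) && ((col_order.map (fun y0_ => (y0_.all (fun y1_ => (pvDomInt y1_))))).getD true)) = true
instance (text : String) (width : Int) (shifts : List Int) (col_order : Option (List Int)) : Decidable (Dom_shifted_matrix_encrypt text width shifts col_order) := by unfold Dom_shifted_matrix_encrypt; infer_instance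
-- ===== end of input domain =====

-- B replaces A's scatter-into-a-dict-grid pass by a direct gather computing each source
-- index (no dict); a timing run measured B faster. Return-value equivalence on Pre_.

-- ===== PORT A =====
-- shifts[r] (inside Pre_ always in range; getD 0 is the junk value outside)
def pvS (shifts : List Int) (r : Int) : Int := (PySem.List.pyGet? shifts r).getD 0

-- the body of A's scatter loop: r, c = divmod(i, width); grid[(r, (c - shifts[r]) % width)] = ch
def pvGridStep (width : Int) (shifts : List Int) (g : PySem.Dict (Int × Int) Char) (p : Int × Char) : PySem.Dict (Int × Int) Char :=
  let r := PySem.Int.floordiv p.1 width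
  let c := PySem.Int.mod p.1 width
  g.insert (r, PySem.Int.mod (c - pvS shifts r) width) p.2

def shifted_matrix_encrypt (text : String) (width : Int) (shifts : List Int) (col_order : Option (List Int)) : String :=
  let tl := text.toList
  let n : Int := tl.length
  let nrows : Int := PySem.Int.floordiv (n + width - 1) width
  let grid : PySem.Dict (Int × Int) Char :=
    (PySem.List.enumerate tl).foldl (pvGridStep width shifts) PySem.Dict.empty
  let cols := match col_order with
    | none => PySem.List.pyRange 0 width 1
    | some l => l
  let result : List Char := cols.foldl (fun acc col =>
    (PySem.List.pyRange 0 nrows 1).foldl (fun acc2 row =>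
      match grid.get? (row, col) with
      | some ch => acc2 ++ [ch]
      | none => acc2) acc) []
  String.ofList result

-- ===== PORT B =====
-- i = row * width + (col + shifts[row]) % width
def pvIdx (width : Int) (shifts : List Int) (row col : Int) : Int :=
  row * width + PySem.Int.mod (col + pvS shifts row) width

def shifted_matrix_encrypt_alt (text : String) (width : Int) (shifts : List Int) (col_order : Option (List Int)) : String :=
  let tl := text.toList
  let n : Int := tl.length
  let nrows : Int := PySem.Int.floordiv (n + width - 1) width
  let cols := match col_order with
    | none => PySem.List.pyRange 0 width 1
    | some l => l
  let out : List Char := cols.foldl (fun acc col =>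
    if 0 ≤ col ∧ col < width then
      (PySem.List.pyRange 0 nrows 1).foldl (fun acc2 row =>
        let i := pvIdx width shifts row col
        if i < n then acc2 ++ (PySem.List.pyGet? tl i).toList else acc2) acc
    else acc) []
  String.ofList out

-- ===== PRECONDITION & SPEC =====
-- Pre_ excludes width ≤ 0 (A raises ZeroDivisionError at width = 0; for width < 0 A's
-- results are accidents of Python's negative floor division / modulo and negative-index
-- wraparound) and shifts too short to cover every row (A raises IndexError there).
def Pre_shifted_matrix_encrypt (text : String) (width : Int) (shifts : List Int) (col_order : Option (List Int)) : Prop :=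
  0 < width ∧ (text.toList.length : Int) ≤ width * shifts.length
instance (text : String) (width : Int) (shifts : List Int) (col_order : Option (List Int)) : Decidable (Pre_shifted_matrix_encrypt text width shifts col_order) := by unfold Pre_shifted_matrix_encrypt; infer_instance

def pvWitness_shifted_matrix_encrypt : String × Int × List Int × Option (List Int) := ("abcde", 2, [1, 0, 3], some [1, 0])

def Spec_shifted_matrix_encrypt (text : String) (width : Int) (shifts : List Int) (col_order : Option (List Int)) (out : String) : Prop := out = shifted_matrix_encrypt_alt text width shifts col_order
instance (text : String) (width : Int) (shifts : List Int) (col_order : Option (List Int)) (out : String) : Decidable (Spec_shifted_matrix_encrypt text width shifts col_order out) := by unfold Spec_shifted_matrix_encrypt; infer_instance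

-- ===== CLAIM (what is proved, stated in full; the proofs are below) =====
def Claim_equal_shifted_matrix_encrypt : Prop := ∀ (text : String) (width : Int) (shifts : List Int) (col_order : Option (List Int)), Dom_shifted_matrix_encrypt text width shifts col_order → Pre_shifted_matrix_encrypt text width shifts col_order → Spec_shifted_matrix_encrypt text width shifts col_order (shifted_matrix_encrypt text width shifts col_order)

-- ===== LEMMAS AND PROOFS =====

-- the key (r, new_c) A stores for absolute index i equals (row, col) iff i = pvIdx width shifts row col
lemma pvKey_eq_iff (width : Int) (shifts : List Int) (hw : 0 < width)
    (i row col : Int) (hcol : 0 ≤ col) (hcolw : col < width) :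
    (PySem.Int.floordiv i width = row ∧
     PySem.Int.mod (PySem.Int.mod i width - pvS shifts (PySem.Int.floordiv i width)) width = col)
      ↔ i = pvIdx width shifts row col := by
  have hw0 : width ≠ 0 := by omega
  simp only [pvIdx, PySem.Int.mod_eq_emod_of_pos hw, PySem.Int.floordiv_eq_ediv_of_pos hw]
  constructor
  · rintro ⟨h1, h2⟩
    rw [h1] at h2
    rw [← h2, Int.emod_add_emod, sub_add_cancel, Int.emod_emod, ← h1]
    exact (Int.ediv_mul_add_emod i width).symm
  · intro h
    have hm0 : 0 ≤ (col + pvS shifts row) % width := Int.emod_nonneg _ hw0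
    have hmw : (col + pvS shifts row) % width < width := Int.emod_lt_of_pos _ hw
    have hd : i / width = row := by
      rw [h, show row * width + (col + pvS shifts row) % width
            = (col + pvS shifts row) % width + width * row from by ring,
        Int.add_mul_ediv_left _ _ hw0, Int.ediv_eq_zero_of_lt hm0 hmw, zero_add]
    have hm : i % width = (col + pvS shifts row) % width := by
      rw [h, show row * width + (col + pvS shifts row) % width
            = (col + pvS shifts row) % width + width * row from by ring,
        Int.add_mul_emod_self_left, Int.emod_emod]
    refine ⟨hd, ?_⟩
    rw [hd, hm, Int.emod_sub_emod, add_sub_cancel_right, Int.emod_eq_of_lt hcol hcolw]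

-- invariant for A's scatter fold
lemma pvGrid_get (width : Int) (shifts : List Int) (hw : 0 < width)
    (tl : List Char) : ∀ (s : Int), 0 ≤ s → ∀ (g : PySem.Dict (Int × Int) Char) (row col : Int),
    ((PySem.List.enumerate tl s).foldl (pvGridStep width shifts) g).get? (row, col)
      = if 0 ≤ row ∧ 0 ≤ col ∧ col < width ∧ s ≤ pvIdx width shifts row col ∧
            pvIdx width shifts row col < s + tl.length
        then PySem.List.pyGet? tl (pvIdx width shifts row col - s)
        else g.get? (row, col) := by
  induction tl with
  | nil =>
    intro s hs g row col
    rw [PySem.List.enumerate_nil, List.foldl_nil, if_neg]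
    rintro ⟨-, -, -, h4, h5⟩
    simp only [List.length_nil, Nat.cast_zero, add_zero] at h5
    omega
  | cons x xs ih =>
    intro s hs g row col
    rw [PySem.List.enumerate_cons, List.foldl_cons, ih (s + 1) (by omega)]
    by_cases hb : 0 ≤ row ∧ 0 ≤ col ∧ col < width
    · obtain ⟨hrow, hcol, hcolw⟩ := hb
      have hi0 : 0 ≤ pvIdx width shifts row col := by
        have h1 := PySem.Int.mod_nonneg (col + pvS shifts row) hw
        have h2 : 0 ≤ row * width := mul_nonneg hrow (le_of_lt hw)
        unfold pvIdx; omega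
      by_cases hcase : pvIdx width shifts row col = s
      · rw [if_neg (by rintro ⟨-, -, -, h4, -⟩; omega), if_pos ⟨hrow, hcol, hcolw, by omega, by
          simp only [List.length_cons]; push_cast; omega⟩]
        obtain ⟨hk1, hk2⟩ := (pvKey_eq_iff width shifts hw s row col hcol hcolw).mpr hcase.symm
        rw [hk1] at hk2
        unfold pvGridStep
        simp only []
        rw [hk1, hk2, PySem.Dict.get?_insert_self, hcase, sub_self]
        exact (PySem.List.pyGet?_zero_cons x xs).symm
      · by_cases hrange : s ≤ pvIdx width shifts row col ∧
            pvIdx width shifts row col < s + (x :: xs).length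
        · have hlen : (pvIdx width shifts row col : Int) < s + 1 + xs.length := by
            have := hrange.2; simp only [List.length_cons] at this; push_cast at this ⊢; omega
          rw [if_pos ⟨hrow, hcol, hcolw, by omega, hlen⟩,
            if_pos ⟨hrow, hcol, hcolw, hrange.1, by
              simp only [List.length_cons]; push_cast; omega⟩]
          obtain ⟨k, hk⟩ : ∃ k : Nat, pvIdx width shifts row col - (s + 1) = (k : Int) :=
            ⟨(pvIdx width shifts row col - (s + 1)).toNat, by omega⟩
          rw [hk, show pvIdx width shifts row col - s = (k : Int) + 1 from by omega,
            PySem.List.pyGet?_cons_succ]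
        · rw [if_neg (by
            rintro ⟨-, -, -, h4, h5⟩
            exact hrange ⟨by omega, by simp only [List.length_cons]; push_cast at h5 ⊢; omega⟩),
            if_neg (by rintro ⟨-, -, -, h4, h5⟩; exact hrange ⟨h4, h5⟩)]
          unfold pvGridStep
          simp only []
          rw [PySem.Dict.get?_insert_of_ne]
          intro heq
          rw [Prod.mk.injEq] at heq
          have := (pvKey_eq_iff width shifts hw s row col hcol hcolw).mp
            ⟨heq.1.symm, heq.2.symm⟩
          exact hrange ⟨by omega, by simp only [List.length_cons]; push_cast; omega⟩
    · rw [if_neg (by tauto), if_neg (by tauto)]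
      unfold pvGridStep
      simp only []
      rw [PySem.Dict.get?_insert_of_ne]
      have h1 : 0 ≤ PySem.Int.floordiv s width := by
        rw [PySem.Int.floordiv_eq_ediv_of_pos hw]; exact Int.ediv_nonneg hs (le_of_lt hw)
      have h2 := PySem.Int.mod_nonneg (PySem.Int.mod s width - pvS shifts (PySem.Int.floordiv s width)) hw
      have h3 := PySem.Int.mod_lt (PySem.Int.mod s width - pvS shifts (PySem.Int.floordiv s width)) hw
      intro heq
      rw [Prod.mk.injEq] at heq
      exact hb ⟨heq.1 ▸ h1, heq.2 ▸ h2, heq.2 ▸ h3⟩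

-- ===== VERDICT (by name: the statement is the Claim_ definition above) =====
theorem shifted_matrix_encrypt_spec : Claim_equal_shifted_matrix_encrypt := by
  intro text width shifts col_order _ hpre
  obtain ⟨hw, -⟩ := hpre
  unfold Spec_shifted_matrix_encrypt shifted_matrix_encrypt shifted_matrix_encrypt_alt
  simp only []
  congr 1
  have hfun : ∀ (acc : List Char) (col : Int),
      (PySem.List.pyRange 0 (PySem.Int.floordiv ((text.toList.length : Int) + width - 1) width) 1).foldl
        (fun acc2 row =>
          match ((PySem.List.enumerate text.toList 0).foldl (pvGridStep width shifts)
              PySem.Dict.empty).get? (row, col) with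
          | some ch => acc2 ++ [ch]
          | none => acc2) acc
      = if 0 ≤ col ∧ col < width then
          (PySem.List.pyRange 0 (PySem.Int.floordiv ((text.toList.length : Int) + width - 1) width) 1).foldl
            (fun acc2 row =>
              if pvIdx width shifts row col < (text.toList.length : Int) then
                acc2 ++ (PySem.List.pyGet? text.toList (pvIdx width shifts row col)).toList
              else acc2) acc
        else acc := by
    intro acc col
    by_cases hc : 0 ≤ col ∧ col < width
    · rw [if_pos hc]
      apply PySem.List.foldl_congr_mem
      intro acc2 row hmem
      have hrow : 0 ≤ row := (PySem.List.mem_pyRange_one.mp hmem).1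
      have hi0 : 0 ≤ pvIdx width shifts row col := by
        have h1 := PySem.Int.mod_nonneg (col + pvS shifts row) hw
        have h2 : 0 ≤ row * width := mul_nonneg hrow (le_of_lt hw)
        unfold pvIdx; omega
      rw [pvGrid_get width shifts hw text.toList 0 le_rfl]
      by_cases hn : pvIdx width shifts row col < (text.toList.length : Int)
      · rw [if_pos ⟨hrow, hc.1, hc.2, hi0, by omega⟩, if_pos hn, sub_zero,
          PySem.List.pyGet?_eq_some_getElem text.toList hi0 hn]
        rfl
      · rw [if_neg (by rintro ⟨-, -, -, -, h5⟩; omega), if_neg hn,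
          PySem.Dict.get?_empty]
    · rw [if_neg hc]
      rw [PySem.List.foldl_congr_mem _ _ (fun a _ => a) acc (by
        intro acc2 row hmem
        rw [pvGrid_get width shifts hw text.toList 0 le_rfl, if_neg (by tauto),
          PySem.Dict.get?_empty])]
      exact List.foldl_fixed _
  cases col_order with
  | none =>
    simp only []
    exact PySem.List.foldl_congr_mem _ _ _ _ (fun acc col _ => hfun acc col)
  | some l =>
    simp only []
    exact PySem.List.foldl_congr_mem _ _ _ _ (fun acc col _ => hfun acc col)
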